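-- pv_equiv track=rewrite | github.com/ftCommunity/ftcommunity-apps | packages/BrickMCP/brickmcp.py | asciify
-- ===== SOURCE A (Python) =====
-- def asciify(name):
--     valid=""
--     res=""
--     for y in range(32,128):
--        valid=valid+chr(y)
--
--     for ch in name:
--         if ch in valid: res=res+ch
--         else: res=res+"-"
--     return res
-- ===== SOURCE B (Python) =====
-- import re
--
-- def asciify(name):
--     return re.sub(r'[^\x20-\x7f]', '-', name)
-- ===== Notes on version B (the rewrite author's own statement) =====
-- stated objective: idiomatic
-- what changed: Replaces the explicit valid-table-building loop and per-char Python-level membership/concat loop with a single C-level regex substitution keeping codepoints 32-127.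
import Mathlib
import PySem

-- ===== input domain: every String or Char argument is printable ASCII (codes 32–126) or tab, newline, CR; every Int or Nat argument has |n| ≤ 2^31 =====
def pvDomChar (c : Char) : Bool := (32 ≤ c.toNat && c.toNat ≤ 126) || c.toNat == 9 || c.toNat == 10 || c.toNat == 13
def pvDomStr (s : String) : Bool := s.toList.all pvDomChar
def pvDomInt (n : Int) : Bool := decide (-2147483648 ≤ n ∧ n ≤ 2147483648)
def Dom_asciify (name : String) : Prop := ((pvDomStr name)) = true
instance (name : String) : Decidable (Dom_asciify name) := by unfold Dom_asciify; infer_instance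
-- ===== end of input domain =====

-- B replaces A's table-building loop and per-char membership scan with a single regex substitution (ported as a per-char map); objective: idiomatic.

-- ===== PORT A =====
-- the first loop: valid = valid + chr(y) over range(32,128)
def asciifyValid : List Char :=
  (PySem.List.pyRange 32 128 1).foldl (fun v y => v ++ [Char.ofNat y.toNat]) []

def asciify (name : String) : String :=
  String.ofList (name.toList.foldl
    (fun res ch => if PySem.Chars.isIn [ch] asciifyValid then res ++ [ch] else res ++ ['-']) [])

-- ===== PORT B =====
-- re.sub(r'[^\x20-\x7f]', '-', name): the regex engine's single pass is ported by hand
-- as a per-char map; the character class [\x20-\x7f] is exactly 32 ≤ code ≤ 127.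
def asciify_alt (name : String) : String :=
  String.ofList (name.toList.map (fun ch => if 32 ≤ ch.toNat ∧ ch.toNat ≤ 127 then ch else '-'))

-- ===== PRECONDITION & SPEC =====
def Spec_asciify (name : String) (out : String) : Prop := out = asciify_alt name
instance (name : String) (out : String) : Decidable (Spec_asciify name out) := by unfold Spec_asciify; infer_instance

-- ===== CLAIM (what is proved, stated in full; the proofs are below) =====
def Claim_equal_asciify : Prop := ∀ (name : String), Dom_asciify name → Spec_asciify name (asciify name)

-- ===== LEMMAS AND PROOFS =====

lemma asciifyValid_eq_map :
    asciifyValid = (PySem.List.pyRange 32 128 1).map (fun y => Char.ofNat y.toNat) := by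
  simpa using PySem.List.foldl_append_singleton_eq_map
    (l := PySem.List.pyRange 32 128 1) (acc := []) (f := fun y => Char.ofNat y.toNat)

lemma mem_asciifyValid_iff (ch : Char) :
    (ch ∈ asciifyValid) ↔ (32 ≤ ch.toNat ∧ ch.toNat ≤ 127) := by
  rw [asciifyValid_eq_map]
  simp only [List.mem_map, PySem.List.mem_pyRange_one]
  constructor
  · rintro ⟨y, ⟨h1, h2⟩, rfl⟩
    have hy : y.toNat < 128 := by omega
    have : (Char.ofNat y.toNat).toNat = y.toNat := by
      rw [Char.toNat_ofNat, if_pos (Or.inl (by omega : y.toNat < 0xd800))]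
    omega
  · rintro ⟨h1, h2⟩
    refine ⟨(ch.toNat : Int), ⟨by omega, by omega⟩, ?_⟩
    simp [Char.ofNat_toNat]

lemma isIn_asciifyValid (ch : Char) :
    PySem.Chars.isIn [ch] asciifyValid = decide (32 ≤ ch.toNat ∧ ch.toNat ≤ 127) := by
  by_cases h : 32 ≤ ch.toNat ∧ ch.toNat ≤ 127
  · obtain ⟨s, t, hl⟩ := List.append_of_mem ((mem_asciifyValid_iff ch).mpr h)
    rw [decide_eq_true h]
    exact (PySem.Chars.isIn_iff_infix _ _).mpr ⟨s, t, by rw [hl]; simp⟩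
  · rw [decide_eq_false h, PySem.Chars.isIn_eq_false_iff]
    rintro ⟨s, t, hst⟩
    exact h ((mem_asciifyValid_iff ch).mp (by rw [← hst]; simp))

lemma asciify_foldl_eq_map (l : List Char) :
    l.foldl (fun res ch =>
        if PySem.Chars.isIn [ch] asciifyValid then res ++ [ch] else res ++ ['-']) [] =
      l.map (fun ch => if 32 ≤ ch.toNat ∧ ch.toNat ≤ 127 then ch else '-') := by
  have hf : (fun res ch =>
      if PySem.Chars.isIn [ch] asciifyValid then res ++ [ch] else res ++ ['-']) =
      (fun (res : List Char) ch =>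
        res ++ [if 32 ≤ ch.toNat ∧ ch.toNat ≤ 127 then ch else '-']) := by
    funext res ch
    rw [isIn_asciifyValid]
    by_cases h : 32 ≤ ch.toNat ∧ ch.toNat ≤ 127 <;> simp [h]
  rw [hf]
  simpa using PySem.List.foldl_append_singleton_eq_map
    (l := l) (acc := []) (f := fun ch => if 32 ≤ ch.toNat ∧ ch.toNat ≤ 127 then ch else '-')

-- ===== VERDICT (by name: the statement is the Claim_ definition above) =====
theorem asciify_spec : Claim_equal_asciify := by
  intro name _
  unfold Spec_asciify asciify asciify_alt
  rw [asciify_foldl_eq_map]
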